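-- pv_equiv track=rewrite | github.com/LukeShirnia/process_uptime | process_uptime.py | seconds2human
-- ===== SOURCE A (Python) =====
-- def seconds2human(seconds, precision=6):
--     """ Convert time in seconds to human-readable representation
--     """
--     intervals = [
--         ("year", 31556952),  # 365.2425 days
--         (
--             "month",
--             2629746,
--         ),  # (365.2425 days / 12) - just using 30 days leaves ~5 days remainder
--         ("week", 604800),
--         ("day", 86400),
--         ("hour", 3600),
--         ("minute", 60),
--         ("second", 1),
--     ]
--     result = []
--     for unit, unit_length in intervals:
--         unit_count, seconds = divmod(seconds, unit_length)
--         if unit_count or result: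
--             if unit_count != 1:
--                 unit += "s"
--             result.append("%s %s" % (unit_count, unit))
--     return ", ".join(result[:precision])
-- ===== SOURCE B (Python) =====
-- _INTERVALS = [
--     ("year", 31556952),
--     ("month", 2629746),
--     ("week", 604800),
--     ("day", 86400),
--     ("hour", 3600),
--     ("minute", 60),
--     ("second", 1),
-- ]
--
--
-- def _emit_all(units, rem):
--     """Recursively format every remaining unit, threading the remainder."""
--     if not units:
--         return []
--     unit, length = units[0]
--     count = rem // length
--     part = "%d %s%s" % (count, unit, "" if count == 1 else "s")
--     return [part] + _emit_all(units[1:], rem - count * length)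
--
--
-- def _skip_leading(units, rem):
--     """Recursively skip zero-count units until the first non-zero one,
--     then hand over to _emit_all for the rest."""
--     if not units:
--         return []
--     unit, length = units[0]
--     count = rem // length
--     if count == 0:
--         return _skip_leading(units[1:], rem % length)
--     part = "%d %s%s" % (count, unit, "" if count == 1 else "s")
--     return [part] + _emit_all(units[1:], rem - count * length)
--
--
-- def seconds2human(seconds, precision=6):
--     """Convert time in seconds to human-readable representation."""
--     return ", ".join(_skip_leading(_INTERVALS, seconds)[:precision])
-- ===== Notes on version B (the rewrite author's own statement) =====
-- stated objective: alternative
-- what changed: A is one imperative loop over the interval table whose body mixes divmod, the leading-zero test against the growing result list, pluralization and appending; B is a pair of mutually-handing-over recursive functions: _skip_leading recurses past zero-count units tracking the remainder, then switches to _emit_all which recursively formats every remaining unit (computing the quotient and new remainder by exact subtraction, with no accumulator list and no trimming step).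
import Mathlib
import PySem

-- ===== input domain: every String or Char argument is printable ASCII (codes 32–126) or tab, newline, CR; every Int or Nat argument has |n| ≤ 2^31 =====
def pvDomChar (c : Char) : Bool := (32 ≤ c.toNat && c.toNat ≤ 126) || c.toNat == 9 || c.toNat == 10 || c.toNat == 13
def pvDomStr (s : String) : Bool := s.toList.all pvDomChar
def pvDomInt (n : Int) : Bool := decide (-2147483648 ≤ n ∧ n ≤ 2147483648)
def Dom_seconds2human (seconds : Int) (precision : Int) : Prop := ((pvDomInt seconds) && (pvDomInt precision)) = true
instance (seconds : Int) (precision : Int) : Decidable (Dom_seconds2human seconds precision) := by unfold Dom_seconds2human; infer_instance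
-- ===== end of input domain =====

-- B replaces A's single accumulator loop by two mutually hand-over recursive functions
-- (skip leading zero units, then format all remaining units); objective: alternative
-- decomposition, same cost.

-- ===== PORT A =====
def pvIntervals : List (String × Int) :=
  [("year", 31556952), ("month", 2629746), ("week", 604800), ("day", 86400),
   ("hour", 3600), ("minute", 60), ("second", 1)]

-- A's loop body: divmod, then append "%s %s" (with 's' added to unit when count ≠ 1)
-- when the count is truthy or the result list is already non-empty.
def seconds2human (seconds : Int) (precision : Int) : String :=
  let st := pvIntervals.foldl
    (fun (st : Int × List String) p =>
      let c := PySem.Int.floordiv st.1 p.2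
      let s' := PySem.Int.mod st.1 p.2
      if c ≠ 0 ∨ st.2 ≠ [] then
        let unit := if c ≠ 1 then p.1 ++ "s" else p.1
        (s', st.2 ++ [PySem.Int.toStr c ++ " " ++ unit])
      else (s', st.2))
    (seconds, [])
  PySem.Str.join ", " (PySem.List.slice st.2 none (some precision))

-- ===== PORT B =====
-- _emit_all: format every remaining unit, remainder updated by exact subtraction
def pvEmitAll : List (String × Int) → Int → List String
  | [], _ => []
  | (u, l) :: rest, rem =>
    let c := PySem.Int.floordiv rem l
    (PySem.Int.toStr c ++ " " ++ u ++ (if c = 1 then "" else "s"))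
      :: pvEmitAll rest (rem - c * l)

-- _skip_leading: recurse past zero-count units, then hand over to pvEmitAll
def pvSkipLeading : List (String × Int) → Int → List String
  | [], _ => []
  | (u, l) :: rest, rem =>
    let c := PySem.Int.floordiv rem l
    if c = 0 then pvSkipLeading rest (PySem.Int.mod rem l)
    else (PySem.Int.toStr c ++ " " ++ u ++ (if c = 1 then "" else "s"))
           :: pvEmitAll rest (rem - c * l)

def seconds2human_alt (seconds : Int) (precision : Int) : String :=
  PySem.Str.join ", " (PySem.List.slice (pvSkipLeading pvIntervals seconds) none (some precision))

-- ===== PRECONDITION & SPEC =====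
def Spec_seconds2human (seconds : Int) (precision : Int) (out : String) : Prop := out = seconds2human_alt seconds precision
instance (seconds : Int) (precision : Int) (out : String) : Decidable (Spec_seconds2human seconds precision out) := by unfold Spec_seconds2human; infer_instance

-- ===== CLAIM =====
def Claim_equal_seconds2human : Prop := ∀ (seconds : Int) (precision : Int), Dom_seconds2human seconds precision → Spec_seconds2human seconds precision (seconds2human seconds precision)

-- ===== LEMMAS AND PROOFS =====

lemma pvFmt_eq (c : Int) (u : String) :
    (PySem.Int.toStr c ++ " " ++ if c = 1 then u else u ++ "s")
      = PySem.Int.toStr c ++ " " ++ u ++ (if c = 1 then "" else "s") := by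
  by_cases h : c = 1 <;> simp [h, String.append_assoc]

lemma pvSub_eq_mod (r l : Int) :
    r - PySem.Int.floordiv r l * l = PySem.Int.mod r l := by
  simp only [PySem.Int.floordiv, PySem.Int.mod]
  have h := Int.mul_fdiv_add_fmod r l
  linarith [h]

lemma pvA_loop_ne (ivs : List (String × Int)) (s : Int) (acc : List String) (h : acc ≠ []) :
    (ivs.foldl
      (fun (st : Int × List String) p =>
        let c := PySem.Int.floordiv st.1 p.2
        let s' := PySem.Int.mod st.1 p.2
        if c ≠ 0 ∨ st.2 ≠ [] then
          let unit := if c ≠ 1 then p.1 ++ "s" else p.1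
          (s', st.2 ++ [PySem.Int.toStr c ++ " " ++ unit])
        else (s', st.2))
      (s, acc)).2 = acc ++ pvEmitAll ivs s := by
  induction ivs generalizing s acc with
  | nil => simp [pvEmitAll]
  | cons p rest ih =>
    cases p with
    | mk u l =>
      simp only [List.foldl_cons, pvEmitAll]
      rw [if_pos (Or.inr h)]
      rw [ih _ _ (by simp)]
      rw [← pvSub_eq_mod s l]
      simp [pvFmt_eq, List.append_assoc]

lemma pvA_loop_nil (ivs : List (String × Int)) (s : Int) :
    (ivs.foldl
      (fun (st : Int × List String) p =>
        let c := PySem.Int.floordiv st.1 p.2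
        let s' := PySem.Int.mod st.1 p.2
        if c ≠ 0 ∨ st.2 ≠ [] then
          let unit := if c ≠ 1 then p.1 ++ "s" else p.1
          (s', st.2 ++ [PySem.Int.toStr c ++ " " ++ unit])
        else (s', st.2))
      (s, ([] : List String))).2 = pvSkipLeading ivs s := by
  induction ivs generalizing s with
  | nil => simp [pvSkipLeading]
  | cons p rest ih =>
    cases p with
    | mk u l =>
      simp only [List.foldl_cons, pvSkipLeading]
      by_cases hc : PySem.Int.floordiv s l = 0
      · rw [if_neg (by simp [hc]), ih, if_pos hc]
      · rw [if_pos (Or.inl hc), if_neg hc]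
        rw [pvA_loop_ne _ _ _ (by simp)]
        rw [← pvSub_eq_mod s l]
        simp [pvFmt_eq]

-- ===== VERDICT =====
theorem seconds2human_spec : Claim_equal_seconds2human := by
  intro seconds precision _
  unfold Spec_seconds2human seconds2human seconds2human_alt
  simp only [pvA_loop_nil]
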